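-- pv_equiv track=rewrite | github.com/Girlorg143/finalyearproject | backend/routes/logistics.py | _recommended_action_for_alerts
-- ===== SOURCE A (Python) =====
-- def _recommended_action_for_alerts(alerts, mode: str) -> str:
--     if not alerts:
--         return "Proceed"
--
--     sev_rank = {
--         "extreme": 4,
--         "severe": 3,
--         "red": 3,
--         "orange": 2,
--         "moderate": 2,
--         "minor": 1,
--         "yellow": 1,
--         "info": 0,
--         "unknown": 0,
--     }
--
--     top = 0
--     for a in alerts:
--         lvl = str(a.get("alertlevel", "")).strip().lower()
--         top = max(top, sev_rank.get(lvl, 0))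
--
--     if top >= 3:
--         return "Reroute / Delay"
--     if top == 2:
--         return "Monitor + Add Buffer"
--     return "Proceed"
-- ===== SOURCE B (Python) =====
-- REROUTE = frozenset({"extreme", "severe", "red"})
-- BUFFER = frozenset({"orange", "moderate"})
--
--
-- def _recommended_action_for_alerts(alerts, mode: str) -> str:
--     present = {str(a.get("alertlevel", "")).strip().lower() for a in alerts}
--     if present & REROUTE:
--         return "Reroute / Delay"
--     if present & BUFFER:
--         return "Monitor + Add Buffer"
--     return "Proceed"
-- ===== Notes on version B (the rewrite author's own statement) =====
-- stated objective: idiomatic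
-- what changed: Replaces the numeric max-severity accumulator and rank thresholds with a set of normalized present levels tested against two severity-category frozensets in priority order.
import Mathlib
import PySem

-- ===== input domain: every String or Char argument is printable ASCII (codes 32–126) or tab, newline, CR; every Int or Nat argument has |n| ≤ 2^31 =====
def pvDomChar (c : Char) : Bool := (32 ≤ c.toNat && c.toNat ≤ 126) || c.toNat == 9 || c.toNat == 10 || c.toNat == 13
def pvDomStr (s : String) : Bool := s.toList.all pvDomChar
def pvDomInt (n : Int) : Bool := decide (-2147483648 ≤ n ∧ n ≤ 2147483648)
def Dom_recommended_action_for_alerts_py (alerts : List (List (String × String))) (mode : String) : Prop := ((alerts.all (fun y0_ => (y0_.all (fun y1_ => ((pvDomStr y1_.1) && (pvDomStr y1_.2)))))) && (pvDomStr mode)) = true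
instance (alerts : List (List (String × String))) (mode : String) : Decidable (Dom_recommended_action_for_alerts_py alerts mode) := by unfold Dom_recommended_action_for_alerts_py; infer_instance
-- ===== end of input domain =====

-- B replaces A's numeric max-severity accumulation with category-set membership tests in priority order (idiomatic; return value only).

-- shared normalization of one alert: str(a.get("alertlevel", "")).strip().lower()
def pvNorm (a : List (String × String)) : String :=
  PySem.Str.lower (PySem.Str.strip ((PySem.Dict.mk a).getD "alertlevel" ""))

-- ===== PORT A =====
-- A's literal sev_rank dict
def pvSevRank : PySem.Dict String Int :=
  PySem.Dict.mk [("extreme", 4), ("severe", 3), ("red", 3), ("orange", 2), ("moderate", 2),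
                 ("minor", 1), ("yellow", 1), ("info", 0), ("unknown", 0)]

def recommended_action_for_alerts_py (alerts : List (List (String × String))) (mode : String) : String :=
  if alerts = [] then "Proceed"
  else
    let top : Int := alerts.foldl (fun top a =>
      let lvl := pvNorm a
      max top (pvSevRank.getD lvl 0)) 0
    if 3 ≤ top then "Reroute / Delay"
    else if top = 2 then "Monitor + Add Buffer"
    else "Proceed"

-- ===== PORT B =====
def pvReroute : PySem.Set String := PySem.Set.ofList ["extreme", "severe", "red"]
def pvBuffer : PySem.Set String := PySem.Set.ofList ["orange", "moderate"]

def recommended_action_for_alerts_py_alt (alerts : List (List (String × String))) (mode : String) : String :=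
  let present : PySem.Set String := PySem.Set.ofList (alerts.map pvNorm)
  if PySem.Set.inter present pvReroute ≠ [] then "Reroute / Delay"
  else if PySem.Set.inter present pvBuffer ≠ [] then "Monitor + Add Buffer"
  else "Proceed"

-- ===== PRECONDITION & SPEC =====
def Spec_recommended_action_for_alerts_py (alerts : List (List (String × String))) (mode : String) (out : String) : Prop := out = recommended_action_for_alerts_py_alt alerts mode
instance (alerts : List (List (String × String))) (mode : String) (out : String) : Decidable (Spec_recommended_action_for_alerts_py alerts mode out) := by unfold Spec_recommended_action_for_alerts_py; infer_instance

-- ===== CLAIM (what is proved, stated in full; the proofs are below) =====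
def Claim_equal_recommended_action_for_alerts_py : Prop := ∀ (alerts : List (List (String × String))) (mode : String), Dom_recommended_action_for_alerts_py alerts mode → Spec_recommended_action_for_alerts_py alerts mode (recommended_action_for_alerts_py alerts mode)

-- ===== LEMMAS AND PROOFS =====

lemma pvRank_cases (s : String) :
    (3 ≤ pvSevRank.getD s 0 ↔ s ∈ pvReroute) ∧
    (2 ≤ pvSevRank.getD s 0 ↔ (s ∈ pvReroute ∨ s ∈ pvBuffer)) := by
  have hR : pvReroute = ["extreme", "severe", "red"] := rfl
  have hB : pvBuffer = ["orange", "moderate"] := rfl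
  simp only [pvSevRank, PySem.Dict.getD_eq_get?_getD,
    PySem.Dict.get?, List.find?_cons, List.find?_nil, hR, hB, List.mem_cons, List.not_mem_nil,
    or_false]
  repeat' split
  all_goals try simp only [beq_iff_eq] at *
  all_goals first
    | (subst_vars; decide)
    | (constructor <;> (refine iff_of_false (by decide) ?_) <;>
        first
          | (rintro (rfl | rfl | rfl) <;> simp_all)
          | (rintro ((rfl | rfl | rfl) | (rfl | rfl)) <;> simp_all))

lemma pvRank_ge3 (s : String) :
    3 ≤ pvSevRank.getD s 0 ↔ s ∈ pvReroute := (pvRank_cases s).1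

lemma pvRank_ge2 (s : String) :
    2 ≤ pvSevRank.getD s 0 ↔ (s ∈ pvReroute ∨ s ∈ pvBuffer) := (pvRank_cases s).2

lemma foldl_max_ge (f : List (String × String) → Int) (xs : List (List (String × String)))
    (t c : Int) :
    c ≤ xs.foldl (fun t a => max t (f a)) t ↔ c ≤ t ∨ ∃ a ∈ xs, c ≤ f a := by
  induction xs generalizing t with
  | nil => simp
  | cons x xs ih =>
    simp only [List.foldl_cons, ih, le_max_iff, List.mem_cons]
    aesop

lemma inter_ne_nil (p t : PySem.Set String) :
    PySem.Set.inter p t ≠ [] ↔ ∃ s ∈ p, s ∈ t := by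
  simp [PySem.Set.inter, List.filter_eq_nil_iff, PySem.Set.contains]

lemma ports_eq (alerts : List (List (String × String))) (mode : String) :
    recommended_action_for_alerts_py alerts mode = recommended_action_for_alerts_py_alt alerts mode := by
  by_cases hnil : alerts = []
  · subst hnil; rfl
  · unfold recommended_action_for_alerts_py recommended_action_for_alerts_py_alt
    rw [if_neg hnil]
    have h3 := foldl_max_ge (fun a => pvSevRank.getD (pvNorm a) 0) alerts 0 3
    have h2 := foldl_max_ge (fun a => pvSevRank.getD (pvNorm a) 0) alerts 0 2
    have hre := inter_ne_nil (PySem.Set.ofList (alerts.map pvNorm)) pvReroute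
    have hbu := inter_ne_nil (PySem.Set.ofList (alerts.map pvNorm)) pvBuffer
    have hre' : PySem.Set.inter (PySem.Set.ofList (alerts.map pvNorm)) pvReroute ≠ [] ↔
        ∃ a ∈ alerts, pvNorm a ∈ pvReroute := by
      rw [hre]
      constructor
      · rintro ⟨s, hs, hmem⟩
        rw [PySem.Set.mem_ofList, List.mem_map] at hs
        obtain ⟨a, ha, rfl⟩ := hs
        exact ⟨a, ha, hmem⟩
      · rintro ⟨a, ha, hmem⟩
        exact ⟨pvNorm a, by rw [PySem.Set.mem_ofList, List.mem_map]; exact ⟨a, ha, rfl⟩, hmem⟩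
    have hbu' : PySem.Set.inter (PySem.Set.ofList (alerts.map pvNorm)) pvBuffer ≠ [] ↔
        ∃ a ∈ alerts, pvNorm a ∈ pvBuffer := by
      rw [hbu]
      constructor
      · rintro ⟨s, hs, hmem⟩
        rw [PySem.Set.mem_ofList, List.mem_map] at hs
        obtain ⟨a, ha, rfl⟩ := hs
        exact ⟨a, ha, hmem⟩
      · rintro ⟨a, ha, hmem⟩
        exact ⟨pvNorm a, by rw [PySem.Set.mem_ofList, List.mem_map]; exact ⟨a, ha, rfl⟩, hmem⟩
    set top : Int := alerts.foldl (fun top a => max top (pvSevRank.getD (pvNorm a) 0)) 0 with htop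
    by_cases hRe : ∃ a ∈ alerts, pvNorm a ∈ pvReroute
    · have ht3 : 3 ≤ top := by
        rw [htop, h3]
        obtain ⟨a, ha, hmem⟩ := hRe
        exact Or.inr ⟨a, ha, (pvRank_ge3 _).2 hmem⟩
      rw [if_pos ht3, if_pos (hre'.2 hRe)]
    · have ht3 : ¬ 3 ≤ top := by
        rw [htop, h3]
        rintro (h | ⟨a, ha, hr⟩)
        · omega
        · exact hRe ⟨a, ha, (pvRank_ge3 _).1 hr⟩
      rw [if_neg ht3, if_neg (fun h => hRe (hre'.1 h))]
      by_cases hBu : ∃ a ∈ alerts, pvNorm a ∈ pvBuffer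
      · have ht2 : 2 ≤ top := by
          rw [htop, h2]
          obtain ⟨a, ha, hmem⟩ := hBu
          exact Or.inr ⟨a, ha, (pvRank_ge2 _).2 (Or.inr hmem)⟩
        rw [if_pos (by omega : top = 2), if_pos (hbu'.2 hBu)]
      · have ht2 : ¬ 2 ≤ top := by
          rw [htop, h2]
          rintro (h | ⟨a, ha, hr⟩)
          · omega
          · rcases (pvRank_ge2 _).1 hr with hm | hm
            · exact hRe ⟨a, ha, hm⟩
            · exact hBu ⟨a, ha, hm⟩
        rw [if_neg (by omega : ¬ top = 2), if_neg (fun h => hBu (hbu'.1 h))]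

-- ===== VERDICT (by name: the statement is the Claim_ definition above) =====
theorem recommended_action_for_alerts_py_spec : Claim_equal_recommended_action_for_alerts_py := by
  intro alerts mode _
  exact ports_eq alerts mode
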